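-- pv_equiv track=rewrite | github.com/joshwalk/206_proj_1 | 206project1.py | classSizes
-- ===== SOURCE A (Python) =====
-- def classSizes(data):
-- # Input: list of dictionaries
-- # Output: Return a list of tuples ordered by
-- # ClassName and Class size, e.g
-- # [('Senior', 26), ('Junior', 25), ('Freshman', 21), ('Sophomore', 18)]
--
-- 	#Your code here:
-- 	count_dict = {}
-- 	list_of_class_strings = []
-- 	for d in data:
-- 	    for k, v in d.items():
-- 	        if k == 'Class':
-- 	            list_of_class_strings.append(v)
-- 	for class_name in list_of_class_strings:
-- 	    count_dict[class_name] = count_dict.get(class_name, 0) + 1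
-- 	tuples_list_class_count = sorted(count_dict.items())
-- 	tuples_list_class_count.sort(key=lambda x: x[1], reverse=True)
-- 	return tuples_list_class_count
-- ===== SOURCE B (Python) =====
-- def classSizes(data):
--     # one pass collecting the 'Class' values, one sort, a run-length scan,
--     # then a single composite-key sort (count desc, name asc)
--     classes = sorted(d['Class'] for d in data if 'Class' in d)
--     groups = []
--     rest = classes
--     while rest:
--         c = rest[0]
--         k = 1
--         while k < len(rest) and rest[k] == c:
--             k += 1
--         groups.append((c, k))
--         rest = rest[k:]
--     groups.sort(key=lambda x: (-x[1], x[0]))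
--     return groups
-- ===== Notes on version B (the rewrite author's own statement) =====
-- stated objective: alternative
-- what changed: B replaces A's dict-counting plus two successive stable sorts (name-ascending, then count-descending) by sorting the collected 'Class' values once, run-length scanning consecutive runs into (name, count) pairs, and emitting the order with a single composite-key sort (-count, name).
import Mathlib
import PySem

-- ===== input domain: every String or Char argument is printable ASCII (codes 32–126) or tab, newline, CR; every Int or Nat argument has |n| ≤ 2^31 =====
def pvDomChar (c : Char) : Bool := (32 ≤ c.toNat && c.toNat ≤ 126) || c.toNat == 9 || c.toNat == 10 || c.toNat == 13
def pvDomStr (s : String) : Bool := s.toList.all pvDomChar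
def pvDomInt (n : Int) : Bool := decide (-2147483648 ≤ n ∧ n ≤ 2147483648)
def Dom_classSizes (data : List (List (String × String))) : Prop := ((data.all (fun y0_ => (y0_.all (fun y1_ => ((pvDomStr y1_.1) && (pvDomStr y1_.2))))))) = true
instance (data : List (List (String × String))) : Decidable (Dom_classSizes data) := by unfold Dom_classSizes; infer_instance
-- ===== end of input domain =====

-- B collects the 'Class' values, sorts them once, run-length scans them into (name, count)
-- pairs and emits the final order with a single composite-key sort (count desc, name asc),
-- instead of A's dict counting followed by two successive stable sorts (alternative decomposition).


-- ===== PORT A =====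
-- A: nested loop collecting values under key 'Class', a get(...,0)+1 counting dict,
-- sorted(items) (tuple order = sorted2 by fst then snd), then a stable sort by count, reverse=True.
def classSizes (data : List (List (String × String))) : List (String × Int) :=
  let listOfClassStrings := data.foldl
    (fun acc d => (PySem.Dict.ofList d).items.foldl
      (fun acc2 kv => if kv.1 == "Class" then acc2 ++ [kv.2] else acc2) acc) []
  let countDict := listOfClassStrings.foldl
    (fun cd c => cd.insert c (cd.getD c 0 + 1)) PySem.Dict.empty
  let tuples := PySem.List.sorted2 countDict.items (fun p => p.1) (fun p => p.2) false
  PySem.List.sorted tuples (fun p => p.2) true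

-- ===== PORT B =====
-- the run-length while-loop of Source B: rest nonempty → scan the equal prefix, emit (c, k), continue on rest[k:]
def pyRuns : List String → List (String × Int)
  | [] => []
  | x :: xs =>
      (x, 1 + ((xs.takeWhile (fun y => y == x)).length : Int)) :: pyRuns (xs.dropWhile (fun y => y == x))
termination_by l => l.length
decreasing_by
  simpa using Nat.lt_succ_of_le (List.length_dropWhile_le _ _)

def classSizes_alt (data : List (List (String × String))) : List (String × Int) :=
  let classes := PySem.List.sorted (data.filterMap (fun d => (PySem.Dict.ofList d).get? "Class")) (fun v => v) false
  PySem.List.sorted2 (pyRuns classes) (fun p => -p.2) (fun p => p.1) false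

-- ===== PRECONDITION & SPEC =====
def Spec_classSizes (data : List (List (String × String))) (out : List (String × Int)) : Prop := out = classSizes_alt data
instance (data : List (List (String × String))) (out : List (String × Int)) : Decidable (Spec_classSizes data out) := by unfold Spec_classSizes; infer_instance

-- ===== CLAIM (what is proved, stated in full; the proofs are below) =====
def Claim_equal_classSizes : Prop := ∀ (data : List (List (String × String))), Dom_classSizes data → Spec_classSizes data (classSizes data)

-- ===== LEMMAS AND PROOFS =====

-- the final order both programs produce: count descending, name ascending on ties
def pvR (a b : String × Int) : Prop := b.2 < a.2 ∨ (a.2 = b.2 ∧ a.1 < b.1)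

theorem pvInsertBy_perm {α : Type} (bf : α → α → Bool) (x : α) (acc : List α) :
    (PySem.List.insertBy bf x acc).Perm (x :: acc) := by
  induction acc with
  | nil => simp [PySem.List.insertBy]
  | cons y ys ih =>
      simp only [PySem.List.insertBy]
      split
      · exact List.Perm.refl _
      · exact (ih.cons y).trans (List.Perm.swap x y ys)

theorem pvInsertBy_pairwise {α : Type} (R : α → α → Prop) (bf : α → α → Bool) (x : α) (acc : List α)
    (hmono : ∀ y z, R y z → bf x y = true → bf x z = true)
    (hacc : acc.Pairwise R)
    (hdec : ∀ y ∈ acc, if bf x y = true then R x y else R y x) :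
    (PySem.List.insertBy bf x acc).Pairwise R := by
  induction acc with
  | nil => simp [PySem.List.insertBy]
  | cons y ys ih =>
      simp only [PySem.List.insertBy]
      rcases List.pairwise_cons.mp hacc with ⟨hy, hys⟩
      by_cases hb : bf x y = true
      · simp only [hb, if_true]
        refine List.pairwise_cons.mpr ⟨?_, hacc⟩
        intro z hz
        rcases List.mem_cons.mp hz with rfl | hz'
        · have := hdec z (by simp); simpa [hb] using this
        · have hbz : bf x z = true := hmono y z (hy z hz') hb
          have := hdec z (by simp [hz'])
          simpa [hbz] using this
      · simp only [hb]
        refine List.pairwise_cons.mpr ⟨?_, ?_⟩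
        · intro z hz
          rcases (PySem.List.mem_insertBy _ _ _ _).mp hz with rfl | hz'
          · have := hdec y (by simp); simpa [hb] using this
          · exact hy z hz'
        · exact ih hys (fun z hz => hdec z (by simp [hz]))

theorem pvFoldl_insertBy {α : Type} (R : α → α → Prop) (bf : α → α → Bool)
    (hmono : ∀ x y z, R y z → bf x y = true → bf x z = true) :
    ∀ (xs acc : List α), acc.Pairwise R →
      (∀ x ∈ xs, ∀ y ∈ acc, if bf x y = true then R x y else R y x) →
      xs.Pairwise (fun a b => if bf b a = true then R b a else R a b) →
      (xs.foldl (fun acc x => PySem.List.insertBy bf x acc) acc).Pairwise R ∧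
      (xs.foldl (fun acc x => PySem.List.insertBy bf x acc) acc).Perm (acc ++ xs) := by
  intro xs
  induction xs with
  | nil => intro acc hacc _ _; exact ⟨hacc, by simp⟩
  | cons x xs ih =>
      intro acc hacc hdec hxs
      rcases List.pairwise_cons.mp hxs with ⟨hx, hxs'⟩
      have hacc' : (PySem.List.insertBy bf x acc).Pairwise R :=
        pvInsertBy_pairwise R bf x acc (fun y z => hmono x y z) hacc
          (fun y hy => hdec x (by simp) y hy)
      have hdec' : ∀ x' ∈ xs, ∀ y ∈ PySem.List.insertBy bf x acc,
          if bf x' y = true then R x' y else R y x' := by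
        intro x' hx' y hy
        rcases (PySem.List.mem_insertBy _ _ _ _).mp hy with rfl | hy'
        · exact hx x' hx'
        · exact hdec x' (by simp [hx']) y hy'
      have := ih (PySem.List.insertBy bf x acc) hacc' hdec' hxs'
      exact ⟨this.1, this.2.trans
        (((pvInsertBy_perm bf x acc).append_right xs).trans List.perm_middle.symm)⟩

-- per-dict: the values appended by A's inner loop are exactly d.get? "Class", as a list
theorem pvFilterClass_list : ∀ (l : List (String × String)), (l.map Prod.fst).Nodup →
    ((l.filter (fun kv => kv.1 == "Class")).map Prod.snd)
      = (Option.map Prod.snd (l.find? (fun p => p.1 == "Class"))).toList := by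
  intro l
  induction l with
  | nil => intro _; simp
  | cons kv t ih =>
      intro hnd
      rcases List.pairwise_cons.mp hnd with ⟨hk, ht⟩
      by_cases hc : (kv.1 == "Class") = true
      · have hkc : kv.1 = "Class" := by simpa using hc
        have hfil : t.filter (fun p => p.1 == "Class") = [] := by
          rw [List.filter_eq_nil_iff]
          intro q hq hq'
          have : q.1 = "Class" := by simpa using hq'
          exact hk q.1 (List.mem_map_of_mem hq) (by rw [this, hkc])
        simp [hc, hfil]
      · simp only [List.filter_cons, List.find?_cons, hc]
        simpa [hc] using ih ht

-- x does not survive dropWhile (== x) on a sorted list dominated by x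
theorem pvNotMemDrop (x : String) : ∀ (xs : List String), (∀ y ∈ xs, x ≤ y) →
    xs.Pairwise (fun a b => a ≤ b) → x ∉ xs.dropWhile (fun y => y == x) := by
  intro xs
  induction xs with
  | nil => intro _ _; simp
  | cons y t ih =>
      intro hle hp
      rcases List.pairwise_cons.mp hp with ⟨hy, ht⟩
      by_cases hc : (y == x) = true
      · rw [show List.dropWhile (fun y => y == x) (y :: t) = List.dropWhile (fun y => y == x) t
              from by rw [List.dropWhile_cons]; simp [hc]]
        exact ih (fun z hz => hle z (by simp [hz])) ht
      · rw [show List.dropWhile (fun y => y == x) (y :: t) = y :: t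
              from by rw [List.dropWhile_cons]; simp [hc]]
        intro hmem
        have hyx : y ≠ x := by simpa using hc
        rcases List.mem_cons.mp hmem with h | h
        · exact hyx h.symm
        · have h1 : y ≤ x := hy x h
          have h2 : x ≤ y := hle y (by simp)
          exact hyx (le_antisymm h1 h2)

-- count of x in a sorted cons is 1 + length of the equal prefix
theorem pvCountHead (x : String) (xs : List String) (hle : ∀ y ∈ xs, x ≤ y)
    (hp : xs.Pairwise (fun a b => a ≤ b)) :
    (x :: xs).count x = 1 + (xs.takeWhile (fun y => y == x)).length ∧
    (∀ k, k ≠ x → (x :: xs).count k = (xs.dropWhile (fun y => y == x)).count k) := by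
  have hsplit : xs.takeWhile (fun y => y == x) ++ xs.dropWhile (fun y => y == x) = xs :=
    List.takeWhile_append_dropWhile
  have htall : ∀ y ∈ xs.takeWhile (fun y => y == x), y = x := by
    intro y hy
    simpa using List.mem_takeWhile_imp hy
  have hnot : x ∉ xs.dropWhile (fun y => y == x) := pvNotMemDrop x xs hle hp
  have key : ∀ k, xs.count k =
      (xs.takeWhile (fun y => y == x)).count k + (xs.dropWhile (fun y => y == x)).count k := by
    intro k
    have : xs.count k =
        (xs.takeWhile (fun y => y == x) ++ xs.dropWhile (fun y => y == x)).count k := by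
      rw [hsplit]
    rw [this, List.count_append]
  constructor
  · rw [List.count_cons_self, key x,
        List.count_eq_length.mpr (fun b hb => (htall b hb).symm),
        List.count_eq_zero.mpr hnot]
    omega
  · intro k hk
    rw [List.count_cons_of_ne (Ne.symm hk), key k,
        List.count_eq_zero.mpr (fun hmem => hk (htall k hmem))]
    omega

-- run-length scan of a sorted list: membership and counts
theorem pvPyRuns_mem_iff : ∀ (ys : List String), ys.Pairwise (fun a b => a ≤ b) →
    ∀ p : String × Int, (p ∈ pyRuns ys ↔ p.1 ∈ ys ∧ p.2 = (ys.count p.1 : Int)) := by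
  intro ys
  induction ys using pyRuns.induct with
  | case1 => intro _ p; simp [pyRuns]
  | case2 x xs ih =>
      intro hp p
      rcases List.pairwise_cons.mp hp with ⟨hle, hxs⟩
      have hr_sorted : (xs.dropWhile (fun y => y == x)).Pairwise (fun a b => a ≤ b) :=
        hxs.sublist (List.dropWhile_sublist _)
      have hr_le : ∀ y ∈ xs.dropWhile (fun y => y == x), x ≤ y :=
        fun y hy => hle y ((List.dropWhile_sublist _).mem hy)
      have hnot : x ∉ xs.dropWhile (fun y => y == x) := pvNotMemDrop x xs hle hxs
      have hcnt := pvCountHead x xs hle hxs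
      have hmem_iff : ∀ k : String, k ∈ x :: xs ↔ k = x ∨ k ∈ xs.dropWhile (fun y => y == x) := by
        intro k
        constructor
        · intro hk
          rcases List.mem_cons.mp hk with rfl | hk'
          · exact Or.inl rfl
          · rw [← List.takeWhile_append_dropWhile (p := fun y => y == x) (l := xs)] at hk'
            rcases List.mem_append.mp hk' with h | h
            · exact Or.inl (by simpa using List.mem_takeWhile_imp h)
            · exact Or.inr h
        · rintro (rfl | hk)
          · simp
          · exact List.mem_cons_of_mem _ ((List.dropWhile_sublist _).mem hk)
      rw [pyRuns]
      constructor
      · intro hmem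
        rcases List.mem_cons.mp hmem with rfl | hmem'
        · refine ⟨by simp, ?_⟩
          show (1 + ((xs.takeWhile (fun y => y == x)).length : Int)) = _
          rw [hcnt.1]; push_cast; ring
        · rcases (ih hr_sorted p).mp hmem' with ⟨h1, h2⟩
          have hpx : p.1 ≠ x := fun h => hnot (h ▸ h1)
          refine ⟨(hmem_iff p.1).mpr (Or.inr h1), ?_⟩
          rw [hcnt.2 p.1 hpx]; exact h2
      · rintro ⟨h1, h2⟩
        rcases (hmem_iff p.1).mp h1 with hx | hr
        · have : p.2 = 1 + ((xs.takeWhile (fun y => y == x)).length : Int) := by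
            rw [h2, hx, hcnt.1]; push_cast; ring
          have hpe : p = (x, 1 + ((xs.takeWhile (fun y => y == x)).length : Int)) :=
            Prod.ext hx this
          rw [hpe]
          exact List.mem_cons_self
        · refine List.mem_cons_of_mem _ ((ih hr_sorted p).mpr ⟨hr, ?_⟩)
          have hpx : p.1 ≠ x := fun h => hnot (h ▸ hr)
          rw [h2, hcnt.2 p.1 hpx]

theorem pvPyRuns_fst_pairwise : ∀ (ys : List String), ys.Pairwise (fun a b => a ≤ b) →
    (pyRuns ys).Pairwise (fun p q => p.1 < q.1) := by
  intro ys
  induction ys using pyRuns.induct with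
  | case1 => intro _; simp [pyRuns]
  | case2 x xs ih =>
      intro hp
      rcases List.pairwise_cons.mp hp with ⟨hle, hxs⟩
      have hr_sorted : (xs.dropWhile (fun y => y == x)).Pairwise (fun a b => a ≤ b) :=
        hxs.sublist (List.dropWhile_sublist _)
      have hnot : x ∉ xs.dropWhile (fun y => y == x) := pvNotMemDrop x xs hle hxs
      rw [pyRuns]
      refine List.pairwise_cons.mpr ⟨?_, ih hr_sorted⟩
      intro q hq
      have h1 : q.1 ∈ xs.dropWhile (fun y => y == x) :=
        ((pvPyRuns_mem_iff _ hr_sorted q).mp hq).1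
      have h2 : x ≤ q.1 := hle q.1 ((List.dropWhile_sublist _).mem h1)
      refine lt_of_le_of_ne h2 (fun h => hnot ?_)
      have hq1 : q.1 = x := (show x = q.1 from h).symm
      rw [hq1] at h1
      exact h1

-- A's collected class-value list is the flatMap of per-dict lookups
theorem pvAList (data : List (List (String × String))) :
    data.foldl (fun acc d => (PySem.Dict.ofList d).items.foldl
        (fun acc2 kv => if kv.1 == "Class" then acc2 ++ [kv.2] else acc2) acc) []
      = data.flatMap (fun d => ((PySem.Dict.ofList d).get? "Class").toList) := by
  have hstep : ∀ (acc : List String), ∀ d ∈ data,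
      (PySem.Dict.ofList d).items.foldl
        (fun acc2 kv => if kv.1 == "Class" then acc2 ++ [kv.2] else acc2) acc
      = acc ++ ((PySem.Dict.ofList d).get? "Class").toList := by
    intro acc d _
    rw [PySem.List.foldl_append_if (fun kv => kv.1 == "Class") Prod.snd]
    congr 1
    have hnd : ((PySem.Dict.ofList d).items.map Prod.fst).Nodup :=
      PySem.Dict.nodup_keys_ofList d
    rw [pvFilterClass_list (PySem.Dict.ofList d).items hnd]
    rfl
  rw [PySem.List.foldl_congr_mem data _
        (fun acc d => acc ++ ((PySem.Dict.ofList d).get? "Class").toList) [] hstep,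
      PySem.List.foldl_append_eq_flatMap]
  simp

-- both final rearrangements are pvR-sorted permutations, hence equal
theorem pvMain (data : List (List (String × String))) :
    classSizes data = classSizes_alt data := by
  set cs := data.flatMap (fun d => ((PySem.Dict.ofList d).get? "Class").toList) with hcs
  set items := (PySem.Set.ofList cs).map (fun k => ((k, (cs.count k : Int)) : String × Int)) with hitems_def
  -- reduce A to sorts of `items`
  have goalA : classSizes data = PySem.List.sorted
      (PySem.List.sorted2 items (fun p => p.1) (fun p => p.2) false)
      (fun p : String × Int => p.2) true := by
    show PySem.List.sorted (PySem.List.sorted2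
        ((data.foldl (fun acc d => (PySem.Dict.ofList d).items.foldl
            (fun acc2 kv => if kv.1 == "Class" then acc2 ++ [kv.2] else acc2) acc) []).foldl
          (fun cd c => cd.insert c (cd.getD c 0 + 1)) PySem.Dict.empty).items
        (fun p => p.1) (fun p => p.2) false) (fun p : String × Int => p.2) true = _
    rw [pvAList data, ← hcs, PySem.Dict.foldl_insert_getD_add_one_eq_counter,
        PySem.Dict.items_counter, ← hitems_def]
  set ys := PySem.List.sorted cs (fun v => v) false with hys_def
  have goalB : classSizes_alt data = PySem.List.sorted2 (pyRuns ys)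
      (fun p : String × Int => -p.2) (fun p => p.1) false := by
    show PySem.List.sorted2 (pyRuns (PySem.List.sorted
        (data.filterMap (fun d => (PySem.Dict.ofList d).get? "Class")) (fun v => v) false))
        (fun p : String × Int => -p.2) (fun p => p.1) false = _
    rw [List.filterMap_eq_flatMap_toList, ← hcs, ← hys_def]
  -- names in `items` are pairwise distinct
  have hne : items.Pairwise (fun a b => a.1 ≠ b.1) := by
    rw [hitems_def, List.pairwise_map]
    exact List.Pairwise.imp (fun h => by simpa using h) (PySem.Set.nodup_ofList cs)
  -- first sort of A: ascending by name
  have e1 : PySem.List.sorted2 items (fun p => p.1) (fun p => p.2) false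
      = items.foldl (fun acc x => PySem.List.insertBy
          (fun a b : String × Int =>
            decide (a.1 < b.1) || (!decide (b.1 < a.1) && decide (a.2 < b.2))) x acc) [] := rfl
  have h1 := pvFoldl_insertBy (fun p q : String × Int => p.1 < q.1)
      (fun a b : String × Int =>
        decide (a.1 < b.1) || (!decide (b.1 < a.1) && decide (a.2 < b.2)))
      (by
        intro x y z hyz hxy
        simp only [Bool.or_eq_true, Bool.and_eq_true, Bool.not_eq_true',
          decide_eq_true_iff, decide_eq_false_iff_not] at hxy ⊢
        rcases hxy with h | ⟨h, _⟩
        · exact Or.inl (lt_trans h hyz)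
        · exact Or.inl (lt_of_le_of_lt (not_lt.mp h) hyz))
      items [] List.Pairwise.nil (by intro x _ y hy; simp at hy)
      (by
        refine hne.imp ?_
        intro a b hab
        by_cases h : b.1 < a.1
        · rw [if_pos (by simp only [Bool.or_eq_true, decide_eq_true_iff]; exact Or.inl h)]
          exact h
        · have hlt : a.1 < b.1 := lt_of_le_of_ne (not_lt.mp h) hab
          rw [if_neg (by
            simp only [Bool.or_eq_true, Bool.and_eq_true, Bool.not_eq_true',
              decide_eq_true_iff, decide_eq_false_iff_not]
            rintro (hc | ⟨hc, _⟩)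
            · exact h hc
            · exact hc hlt)]
          exact hlt)
  have htup1 : (PySem.List.sorted2 items (fun p => p.1) (fun p => p.2) false).Pairwise
      (fun p q : String × Int => p.1 < q.1) := by rw [e1]; exact h1.1
  have htup2 : (PySem.List.sorted2 items (fun p => p.1) (fun p => p.2) false).Perm items := by
    rw [e1]; simpa using h1.2
  -- second sort of A: stable, by count descending
  have e2 : PySem.List.sorted
      (PySem.List.sorted2 items (fun p => p.1) (fun p => p.2) false)
      (fun p : String × Int => p.2) true
      = (PySem.List.sorted2 items (fun p => p.1) (fun p => p.2) false).foldl
          (fun acc x => PySem.List.insertBy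
            (fun a b : String × Int => decide (b.2 < a.2)) x acc) [] := rfl
  have h2 := pvFoldl_insertBy pvR (fun a b : String × Int => decide (b.2 < a.2))
      (by
        intro x y z hyz hxy
        simp only [pvR] at hyz
        simp only [decide_eq_true_iff] at hxy ⊢
        rcases hyz with h | ⟨h, _⟩ <;> omega)
      (PySem.List.sorted2 items (fun p => p.1) (fun p => p.2) false) []
      List.Pairwise.nil (by intro x _ y hy; simp at hy)
      (by
        refine htup1.imp ?_
        intro a b hab
        by_cases h : a.2 < b.2
        · rw [if_pos (by simpa using h)]
          exact Or.inl h
        · rw [if_neg (by simpa using h)]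
          rcases eq_or_lt_of_le (not_lt.mp h) with heq | hlt
          · exact Or.inr ⟨heq.symm, hab⟩
          · exact Or.inl hlt)
  have hA1 : (PySem.List.sorted
      (PySem.List.sorted2 items (fun p => p.1) (fun p => p.2) false)
      (fun p : String × Int => p.2) true).Pairwise pvR := by rw [e2]; exact h2.1
  have hA2 : (PySem.List.sorted
      (PySem.List.sorted2 items (fun p => p.1) (fun p => p.2) false)
      (fun p : String × Int => p.2) true).Perm items := by
    rw [e2]
    exact ((h2.2).trans (by simp)).trans htup2
  -- B side: the run-length pairs are a permutation of `items`
  have hys1 : ys.Pairwise (fun a b : String => a ≤ b) := by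
    simpa using PySem.List.sorted_pairwise cs (fun v => v)
  have hys2 : ys.Perm cs := PySem.List.sorted_perm cs (fun v => v) false
  have hgmem := pvPyRuns_mem_iff ys hys1
  have hgp := pvPyRuns_fst_pairwise ys hys1
  have hgs_map : (pyRuns ys).map (fun p => ((p.1, (cs.count p.1 : Int)) : String × Int))
      = pyRuns ys := by
    have hid : ∀ p ∈ pyRuns ys, ((p.1, (cs.count p.1 : Int)) : String × Int) = p := by
      intro p hp
      rcases (hgmem p).mp hp with ⟨_, h2⟩
      refine Prod.ext rfl ?_
      rw [h2, hys2.count_eq p.1]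
    rw [List.map_congr_left hid]
    simp
  have hfst_nodup : ((pyRuns ys).map Prod.fst).Nodup :=
    List.pairwise_map.mpr (hgp.imp (fun h => ne_of_lt h))
  have hpermfst : ((pyRuns ys).map Prod.fst).Perm (PySem.Set.ofList cs) := by
    refine (List.perm_ext_iff_of_nodup hfst_nodup (PySem.Set.nodup_ofList cs)).mpr ?_
    intro k
    rw [PySem.Set.mem_ofList]
    constructor
    · intro hk
      rcases List.mem_map.mp hk with ⟨p, hp, rfl⟩
      exact hys2.mem_iff.mp ((hgmem p).mp hp).1
    · intro hk
      exact List.mem_map.mpr ⟨(k, (ys.count k : Int)),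
        (hgmem _).mpr ⟨hys2.mem_iff.mpr hk, rfl⟩, rfl⟩
  have hgs_perm : (pyRuns ys).Perm items := by
    have h := hpermfst.map (fun k => ((k, (cs.count k : Int)) : String × Int))
    rw [List.map_map] at h
    have hcomp : (pyRuns ys).map
        ((fun k => ((k, (cs.count k : Int)) : String × Int)) ∘ Prod.fst) = pyRuns ys := hgs_map
    rw [hcomp] at h
    exact h
  -- B's composite sort
  have e3 : PySem.List.sorted2 (pyRuns ys) (fun p : String × Int => -p.2) (fun p => p.1) false
      = (pyRuns ys).foldl (fun acc x => PySem.List.insertBy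
          (fun a b : String × Int =>
            decide (-a.2 < -b.2) || (!decide (-b.2 < -a.2) && decide (a.1 < b.1))) x acc) [] := rfl
  have h3 := pvFoldl_insertBy pvR
      (fun a b : String × Int =>
        decide (-a.2 < -b.2) || (!decide (-b.2 < -a.2) && decide (a.1 < b.1)))
      (by
        intro x y z hyz hxy
        simp only [pvR] at hyz
        simp only [Bool.or_eq_true, Bool.and_eq_true, Bool.not_eq_true',
          decide_eq_true_iff, decide_eq_false_iff_not] at hxy ⊢
        rcases hxy with h | ⟨h1, h2⟩
        · rcases hyz with hz | ⟨hz, _⟩ <;> (left; omega)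
        · rcases hyz with hz | ⟨hz, hz2⟩
          · left; omega
          · exact Or.inr ⟨by omega, lt_trans h2 hz2⟩)
      (pyRuns ys) [] List.Pairwise.nil (by intro x _ y hy; simp at hy)
      (by
        refine hgp.imp ?_
        intro a b hab
        by_cases h : a.2 < b.2
        · rw [if_pos (by
            simp only [Bool.or_eq_true, decide_eq_true_iff]
            exact Or.inl (by omega))]
          exact Or.inl h
        · rw [if_neg (by
            simp only [Bool.or_eq_true, Bool.and_eq_true, Bool.not_eq_true',
              decide_eq_true_iff, decide_eq_false_iff_not]
            rintro (hc | ⟨_, hc⟩)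
            · exact h (by omega)
            · exact lt_asymm hab hc)]
          rcases eq_or_lt_of_le (not_lt.mp h) with heq | hlt
          · exact Or.inr ⟨heq.symm, hab⟩
          · exact Or.inl hlt)
  have hB1 : (PySem.List.sorted2 (pyRuns ys) (fun p : String × Int => -p.2)
      (fun p => p.1) false).Pairwise pvR := by rw [e3]; exact h3.1
  have hB2 : (PySem.List.sorted2 (pyRuns ys) (fun p : String × Int => -p.2)
      (fun p => p.1) false).Perm (pyRuns ys) := by
    rw [e3]; simpa using h3.2
  -- assemble
  rw [goalA, goalB]
  refine List.Perm.eq_of_pairwise ?_ hA1 hB1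
      ((hA2.trans hgs_perm.symm).trans hB2.symm)
  intro a b _ _ h1 h2
  exfalso
  simp only [pvR] at h1 h2
  rcases h1 with h1 | ⟨h1a, h1b⟩ <;> rcases h2 with h2 | ⟨h2a, h2b⟩
  · omega
  · omega
  · omega
  · exact lt_asymm h1b h2b

-- ===== VERDICT (by name: the statement is the Claim_ definition above) =====
theorem classSizes_spec : Claim_equal_classSizes := by
  intro data _
  exact pvMain data
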